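-- pv_equiv track=rewrite | github.com/oshura3/Athena-Public | examples/scripts/compress_sessions.py | compress_session_log
-- ===== SOURCE A (Python) =====
-- COLLAPSE_SECTIONS = [
--     "## 1. Agenda",
--     "## 3. Action Items",
--     "## 4. Session Performance Review",
--     "## 6. Artifacts",
--     "## 8. Parking Lot",
-- ]
--
-- def compress_session_log(content: str) -> str:
--     """Compress a session log, keeping only essential sections."""
--     lines = content.split("\n")
--     compressed = []
--     in_keep_section = True
--     skip_until_next_section = False
--
--     for line in lines:
--         # Check if we're entering a section to collapse
--         is_collapse_section = any(line.startswith(s) for s in COLLAPSE_SECTIONS)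
--         is_any_section = line.startswith("## ") or line.startswith("### ")
--
--         if is_collapse_section:
--             # Add a one-liner placeholder
--             section_name = line.split("(")[0].strip() if "(" in line else line.strip()
--             compressed.append(f"{section_name}")
--             compressed.append("*[Compressed]*")
--             compressed.append("")
--             skip_until_next_section = True
--             continue
--
--         if is_any_section and skip_until_next_section:
--             skip_until_next_section = False
--
--         if not skip_until_next_section:
--             compressed.append(line)
--
--     return "\n".join(compressed)
-- ===== SOURCE B (Python) =====
-- COLLAPSE_SECTIONS = [
--     "## 1. Agenda",
--     "## 3. Action Items",
--     "## 4. Session Performance Review",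
--     "## 6. Artifacts",
--     "## 8. Parking Lot",
-- ]
--
-- def compress_session_log(content: str) -> str:
--     """Compress a session log, keeping only essential sections."""
--     lines = content.split("\n")
--     out = []
--     i = 0
--     n = len(lines)
--     while i < n:
--         line = lines[i]
--         if any(line.startswith(s) for s in COLLAPSE_SECTIONS):
--             section_name = line.split("(")[0].strip() if "(" in line else line.strip()
--             out.append(section_name)
--             out.append("*[Compressed]*")
--             out.append("")
--             i += 1
--             # skip body lines until the next header (which is re-examined itself)
--             while i < n and not (lines[i].startswith("## ") or lines[i].startswith("### ")):
--                 i += 1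
--         else:
--             out.append(line)
--             i += 1
--     return "\n".join(out)
-- ===== Notes on version B (the rewrite author's own statement) =====
-- stated objective: alternative
-- what changed: Replaced A's single pass with a skip-until-next-section boolean flag by an index-driven loop that, on a collapse header, emits the placeholder and runs an inner loop dropping body lines up to (not including) the next markdown section header.
import Mathlib
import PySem

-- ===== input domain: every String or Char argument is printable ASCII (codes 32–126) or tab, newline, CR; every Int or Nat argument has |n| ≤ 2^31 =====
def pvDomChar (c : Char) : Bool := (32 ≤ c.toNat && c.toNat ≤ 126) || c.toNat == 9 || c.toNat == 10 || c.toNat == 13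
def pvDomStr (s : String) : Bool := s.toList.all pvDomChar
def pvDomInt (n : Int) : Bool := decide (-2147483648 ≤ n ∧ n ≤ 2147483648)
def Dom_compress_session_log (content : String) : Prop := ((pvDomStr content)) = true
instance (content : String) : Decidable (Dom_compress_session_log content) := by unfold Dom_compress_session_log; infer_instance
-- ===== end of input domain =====

-- B replaces A's skip-flag fold with an index-driven loop that, at a collapse header,
-- drops the following body lines up to (not including) the next header; objective: alternative decomposition.

-- ===== PORT A =====
def pvCollapseSections : List String :=
  ["## 1. Agenda", "## 3. Action Items", "## 4. Session Performance Review",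
   "## 6. Artifacts", "## 8. Parking Lot"]

def pvSectionName (line : String) : String :=
  if PySem.Str.isIn "(" line then
    PySem.Str.strip (((PySem.Str.split? line "(").getD [line]).headD "")
  else
    PySem.Str.strip line

def compress_session_log (content : String) : String :=
  let lines := (PySem.Str.split? content "\n").getD [content]
  let st := lines.foldl (fun (st : List String × Bool) line =>
    let compressed := st.1
    let skip_until_next_section := st.2
    let is_collapse_section := pvCollapseSections.any (fun s => PySem.Str.startswith line s)
    let is_any_section := PySem.Str.startswith line "## " || PySem.Str.startswith line "### "
    if is_collapse_section then
      (compressed ++ [pvSectionName line, "*[Compressed]*", ""], true)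
    else
      let skip' := if is_any_section && skip_until_next_section then false
                   else skip_until_next_section
      if skip' then (compressed, skip') else (compressed ++ [line], skip'))
    ([], false)
  PySem.Str.join "\n" st.1

-- ===== PORT B =====
def pvIsHeader (line : String) : Bool :=
  PySem.Str.startswith line "## " || PySem.Str.startswith line "### "

def pvIsCollapse (line : String) : Bool :=
  pvCollapseSections.any (fun s => PySem.Str.startswith line s)

def pvBLoop : List String → List String
  | [] => []
  | line :: rest =>
    if pvIsCollapse line then
      pvSectionName line :: "*[Compressed]*" :: "" ::
        pvBLoop (rest.dropWhile (fun l => !pvIsHeader l))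
    else
      line :: pvBLoop rest
termination_by xs => xs.length
decreasing_by
  · exact Nat.lt_succ_of_le (List.length_dropWhile_le _ _)
  · simp

def compress_session_log_alt (content : String) : String :=
  PySem.Str.join "\n" (pvBLoop ((PySem.Str.split? content "\n").getD [content]))

-- ===== PRECONDITION & SPEC =====
def Spec_compress_session_log (content : String) (out : String) : Prop := out = compress_session_log_alt content
instance (content : String) (out : String) : Decidable (Spec_compress_session_log content out) := by unfold Spec_compress_session_log; infer_instance

-- ===== CLAIM (what is proved, stated in full; the proofs are below) =====
def Claim_equal_compress_session_log : Prop := ∀ (content : String), Dom_compress_session_log content → Spec_compress_session_log content (compress_session_log content)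

-- ===== LEMMAS AND PROOFS =====

-- A's fold step and the fold written as forward recursion on (lines, skip flag)
def pvStep (st : List String × Bool) (line : String) : List String × Bool :=
  if pvIsCollapse line then
    (st.1 ++ [pvSectionName line, "*[Compressed]*", ""], true)
  else
    let skip' := if pvIsHeader line && st.2 then false else st.2
    if skip' then (st.1, skip') else (st.1 ++ [line], skip')

def pvALoop : List String → Bool → List String
  | [], _ => []
  | line :: rest, skip =>
    if pvIsCollapse line then
      pvSectionName line :: "*[Compressed]*" :: "" :: pvALoop rest true
    else
      let skip' := if pvIsHeader line && skip then false else skip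
      if skip' then pvALoop rest skip' else line :: pvALoop rest skip'

lemma pvFoldl_eq_aLoop (xs : List String) (acc : List String) (skip : Bool) :
    (xs.foldl pvStep (acc, skip)).1 = acc ++ pvALoop xs skip := by
  induction xs generalizing acc skip with
  | nil => simp [pvALoop]
  | cons line rest ih =>
    rw [List.foldl_cons, pvALoop]
    by_cases hc : pvIsCollapse line = true
    · simp only [pvStep, hc, if_true, ih]
      simp
    · simp only [Bool.not_eq_true] at hc
      simp only [pvStep, hc, Bool.false_eq_true, if_false]
      cases hH : pvIsHeader line <;> cases hS : skip <;> simp [hH, hS, ih]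

lemma pvDropHead (l : List String) (y : String) (ys : List String)
    (h : l.dropWhile (fun s => !pvIsHeader s) = y :: ys) : pvIsHeader y = true := by
  induction l with
  | nil => simp at h
  | cons a t ih =>
    by_cases ha : pvIsHeader a = true
    · rw [List.dropWhile_cons_of_neg (by simp [ha])] at h
      cases h; exact ha
    · rw [List.dropWhile_cons_of_pos (by simp [Bool.not_eq_true] at ha ⊢; exact ha)] at h
      exact ih h

lemma pvCollapse_isHeader (line : String) (h : pvIsCollapse line = true) :
    pvIsHeader line = true := by
  unfold pvIsCollapse pvCollapseSections at h
  unfold pvIsHeader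
  simp only [List.any_cons, List.any_nil, Bool.or_eq_true, Bool.or_false,
    PySem.Str.startswith_eq, PySem.Chars.startswith_iff] at h ⊢
  left
  rcases h with h | h | h | h | h <;>
    exact List.IsPrefix.trans (by decide) h

lemma pvALoop_skip (xs : List String) :
    pvALoop xs true = pvALoop (xs.dropWhile (fun l => !pvIsHeader l)) true := by
  induction xs with
  | nil => simp
  | cons line rest ih =>
    by_cases hh : pvIsHeader line = true
    · rw [List.dropWhile_cons_of_neg (by simp [hh])]
    · have hc : pvIsCollapse line = false := by
        cases h : pvIsCollapse line
        · rfl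
        · exact absurd (pvCollapse_isHeader line h) (by simpa using hh)
      simp only [Bool.not_eq_true] at hh
      rw [List.dropWhile_cons_of_pos (by simp [hh])]
      rw [pvALoop]
      simp [hc, hh, ih]

lemma pvALoop_eq_bLoop (xs : List String) : pvALoop xs false = pvBLoop xs := by
  induction hn : xs.length using Nat.strong_induction_on generalizing xs with
  | _ n ih =>
    cases xs with
    | nil => simp [pvALoop, pvBLoop]
    | cons line rest =>
      subst hn
      by_cases hc : pvIsCollapse line = true
      · have hsame : pvALoop (rest.dropWhile (fun l => !pvIsHeader l)) true
            = pvALoop (rest.dropWhile (fun l => !pvIsHeader l)) false := by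
          cases h : rest.dropWhile (fun l => !pvIsHeader l) with
          | nil => simp [pvALoop]
          | cons y ys =>
            have hy : pvIsHeader y = true := pvDropHead rest y ys h
            by_cases hyc : pvIsCollapse y = true
            · simp [pvALoop, hyc]
            · simp only [Bool.not_eq_true] at hyc
              simp [pvALoop, hyc, hy]
        have hlen : (rest.dropWhile (fun l => !pvIsHeader l)).length < (line :: rest).length :=
          Nat.lt_succ_of_le (List.length_dropWhile_le _ _)
        rw [pvALoop, pvBLoop]
        simp only [hc, if_true]
        rw [pvALoop_skip rest, hsame, ih _ hlen _ rfl]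
      · simp only [Bool.not_eq_true] at hc
        rw [pvALoop, pvBLoop]
        simp only [hc, Bool.false_eq_true, if_false]
        have : rest.length < (line :: rest).length := by simp
        simp [ih _ this _ rfl]

-- ===== VERDICT (by name: the statement is the Claim_ definition above) =====
theorem compress_session_log_spec : Claim_equal_compress_session_log := by
  intro content _
  show _ = _
  unfold compress_session_log compress_session_log_alt
  show PySem.Str.join "\n"
      (List.foldl pvStep ([], false) ((PySem.Str.split? content "\n").getD [content])).1 = _
  rw [pvFoldl_eq_aLoop, List.nil_append, pvALoop_eq_bLoop]
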